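-- pv_equiv track=rewrite | github.com/nitishkmr005/prismDocs | src/doc_generator/utils/content_merger.py | _adjust_header_levels
-- ===== SOURCE A (Python) =====
-- def _adjust_header_levels(content: str) -> str:
--     """
--     Adjust markdown header levels to fit within the merged document structure.
--
--     Since the merged document uses # for title and ## for sections,
--     we shift all headers in individual content down by 2 levels.
--
--     Args:
--         content: Markdown content
--
--     Returns:
--         Content with adjusted header levels
--     Invoked by: src/doc_generator/utils/content_merger.py
--     """
--     lines = content.split("\n")
--     adjusted_lines = []
--
--     for line in lines:
--         if line.strip().startswith("#"):
--             header_match = line.lstrip()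
--             hash_count = 0
--             for char in header_match:
--                 if char == "#":
--                     hash_count += 1
--                 else:
--                     break
--
--             new_level = min(hash_count + 2, 6)
--             header_text = header_match[hash_count:].lstrip()
--             adjusted_line = "#" * new_level + " " + header_text
--             adjusted_lines.append(adjusted_line)
--         else:
--             adjusted_lines.append(line)
--
--     return "\n".join(adjusted_lines)
-- ===== SOURCE B (Python) =====
-- def _adjust_header_levels(content: str) -> str:
--     # Single streaming pass over the string (no split/join, no per-line list).
--     out = []
--     i = 0
--     n = len(content)
--     while i < n:
--         start = i
--         while i < n and content[i] != "\n" and content[i].isspace():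
--             i += 1
--         if i < n and content[i] == "#":
--             j = i
--             while i < n and content[i] == "#":
--                 i += 1
--             out.append("#" * min(i - j + 2, 6) + " ")
--             while i < n and content[i] != "\n" and content[i].isspace():
--                 i += 1
--         else:
--             out.append(content[start:i])
--         while i < n and content[i] != "\n":
--             out.append(content[i])
--             i += 1
--         if i < n:
--             out.append("\n")
--             i += 1
--     return "".join(out)
-- ===== Notes on version B (the rewrite author's own statement) =====
-- stated objective: alternative
-- what changed: Replaces A's split-into-lines / per-line rebuild / join pipeline with a single streaming scan over the raw string using an index state machine (indent scan, hash run, whitespace skip, verbatim copy), never materialising a line list.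
import Mathlib
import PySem

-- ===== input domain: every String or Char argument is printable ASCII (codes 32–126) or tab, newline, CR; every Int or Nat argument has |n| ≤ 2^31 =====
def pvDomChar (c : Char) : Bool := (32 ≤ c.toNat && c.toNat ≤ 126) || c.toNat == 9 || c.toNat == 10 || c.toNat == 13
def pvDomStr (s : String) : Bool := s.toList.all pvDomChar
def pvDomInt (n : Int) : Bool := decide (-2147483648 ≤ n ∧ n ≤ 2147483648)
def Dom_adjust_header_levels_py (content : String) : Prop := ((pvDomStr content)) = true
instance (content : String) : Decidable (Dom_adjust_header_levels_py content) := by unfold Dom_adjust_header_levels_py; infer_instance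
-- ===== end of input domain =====

-- B is an ALTERNATIVE implementation: one streaming scan over the raw string instead of
-- A's split-into-lines / per-line rebuild / join pipeline; same O(n) cost, no speed claim.

-- ===== PORT A =====
-- inner loop: 'for char in header_match: if char == "#": hash_count += 1 else: break'
def pvCountHash : List Char → Nat
  | [] => 0
  | c :: rest => if c = '#' then pvCountHash rest + 1 else 0

-- the body of A's per-line loop
def pvA_line (line : List Char) : List Char :=
  if PySem.Chars.startswith (PySem.Chars.strip line) ['#'] then
    let header_match := PySem.Chars.lstrip line
    let hash_count := pvCountHash header_match
    let new_level := min (hash_count + 2) 6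
    let header_text := PySem.Chars.lstrip (PySem.List.slice header_match (some (hash_count : Int)) none)
    List.replicate new_level '#' ++ ' ' :: header_text
  else line

def adjust_header_levels_py (content : String) : String :=
  let lines := PySem.Chars.splitOn content.toList ['\n']
  let adjusted_lines := lines.foldl (fun acc line => acc ++ [pvA_line line]) []
  String.mk (PySem.Chars.join ['\n'] adjusted_lines)

-- ===== PORT B =====
-- 'content[i] != "\n" and content[i].isspace()'
def pvLineWS (c : Char) : Bool := c != '\n' && PySem.Chars.isspace c

-- position after the hash run / indent scan (the value of i before the copy loop)
def pvB_tail (cs : List Char) : List Char :=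
  if (cs.dropWhile pvLineWS).head? == some '#'
    then ((cs.dropWhile pvLineWS).dropWhile (· == '#')).dropWhile pvLineWS
    else cs.dropWhile pvLineWS

lemma pvB_tail_le (cs : List Char) : (pvB_tail cs).length ≤ cs.length := by
  unfold pvB_tail
  split_ifs
  · exact le_trans (List.length_dropWhile_le _ _)
      (le_trans (List.length_dropWhile_le _ _) (List.length_dropWhile_le _ _))
  · exact List.length_dropWhile_le _ _

-- B's while-loop state machine: each round of the outer loop handles one line
def pvB_go (cs : List Char) : List Char :=
  if cs = [] then [] else
    (if (cs.dropWhile pvLineWS).head? == some '#'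
      then List.replicate (min (((cs.dropWhile pvLineWS).takeWhile (· == '#')).length + 2) 6) '#' ++ [' ']
      else cs.takeWhile pvLineWS)
    ++ (pvB_tail cs).takeWhile (· != '\n')
    ++ (match h : (pvB_tail cs).dropWhile (· != '\n') with
        | _ :: tl => '\n' :: pvB_go tl
        | [] => [])
termination_by cs.length
decreasing_by
  have h1 := List.length_dropWhile_le (· != '\n') (pvB_tail cs)
  rw [h] at h1
  simp at h1
  have h2 := pvB_tail_le cs
  omega

def adjust_header_levels_py_alt (content : String) : String :=
  String.mk (pvB_go content.toList)

-- ===== PRECONDITION & SPEC =====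
def Spec_adjust_header_levels_py (content : String) (out : String) : Prop := out = adjust_header_levels_py_alt content
instance (content : String) (out : String) : Decidable (Spec_adjust_header_levels_py content out) := by unfold Spec_adjust_header_levels_py; infer_instance

-- ===== CLAIM (what is proved, stated in full; the proofs are below) =====
def Claim_equal_adjust_header_levels_py : Prop := ∀ (content : String), Dom_adjust_header_levels_py content → Spec_adjust_header_levels_py content (adjust_header_levels_py content)

-- ===== LEMMAS AND PROOFS =====

-- reference splitter: first line, then recurse past the newline
def pvSplit1 (cs : List Char) : List (List Char) :=
  cs.takeWhile (· != '\n') ::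
    (match h : cs.dropWhile (· != '\n') with
     | _ :: tl => pvSplit1 tl
     | [] => [])
termination_by cs.length
decreasing_by
  have h1 := List.length_dropWhile_le (p := (· != '\n')) (l := cs)
  rw [h] at h1
  simp at h1
  omega

lemma pvSplit1_nil : pvSplit1 [] = [[]] := by
  rw [pvSplit1]
  simp

lemma pvSplit1_cons_ne (c : Char) (rest : List Char) (hc : (c != '\n') = true) :
    pvSplit1 (c :: rest) = (pvSplit1 rest).modifyHead (c :: ·) := by
  rw [pvSplit1, pvSplit1]
  have hd : List.dropWhile (fun x => x != '\n') (c :: rest)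
      = List.dropWhile (fun x => x != '\n') rest := by
    simp [List.dropWhile_cons, hc]
  simp only [List.takeWhile_cons, hc, if_true, List.modifyHead_cons]
  congr 1
  split
  · next x tl heq1 =>
    rw [hd] at heq1
    split
    · next y tl2 heq2 =>
      rw [heq2] at heq1
      injection heq1 with h1 h2
      rw [h2]
    · next heq2 => rw [heq2] at heq1; simp at heq1
  · next heq1 =>
    rw [hd] at heq1
    split
    · next y tl2 heq2 => rw [heq2] at heq1; simp at heq1
    · next heq2 => rfl

lemma pvSplit1_nl (rest : List Char) : pvSplit1 ('\n' :: rest) = [] :: pvSplit1 rest := by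
  rw [pvSplit1]
  simp only [List.takeWhile_cons, bne_self_eq_false, Bool.false_eq_true, if_false]
  congr 1

lemma pvSplit1_ne_nil (cs : List Char) : ∃ T Ts, pvSplit1 cs = T :: Ts := by
  rw [pvSplit1]
  exact ⟨_, _, rfl⟩

lemma pvModifyHead_id (l : List (List Char)) : l.modifyHead (fun x => x) = l := by
  cases l <;> simp

lemma pvModifyHead_nil_append (l : List (List Char)) :
    l.modifyHead (([] : List Char) ++ ·) = l := by
  cases l <;> simp

lemma pvModifyHead_comp (a : List Char) (c : Char) (l : List (List Char)) :
    l.modifyHead ((a ++ [c]) ++ ·) = (l.modifyHead (c :: ·)).modifyHead (a ++ ·) := by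
  cases l <;> simp

lemma pvGo_spec :
    ∀ fuel (l cur : List Char) (acc : List (List Char)), l.length < fuel →
      PySem.Chars.splitOn.go ['\n'] fuel l cur.reverse acc
        = acc.reverse ++ ((pvSplit1 l).modifyHead (cur ++ ·)) := by
  intro fuel
  induction fuel with
  | zero => intro l cur acc h; omega
  | succ f ih =>
    intro l cur acc h
    cases l with
    | nil =>
      rw [PySem.Chars.splitOn.go]
      simp [pvSplit1_nil]
      all_goals omega
    | cons c rest =>
      rw [PySem.Chars.splitOn.go]
      by_cases hc : c = '\n'
      · subst hc
        have hpre : List.isPrefixOf ['\n'] ('\n' :: rest) = true := by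
          simp [List.isPrefixOf]
        simp only [hpre, if_true]
        have step := ih rest [] (cur :: acc) (by simp at h ⊢; omega)
        simp only [List.reverse_nil] at step
        have : ('\n' :: rest).drop (['\n'].length) = rest := by simp
        simp only [List.length_cons, List.length_nil, Nat.zero_add, List.drop_succ_cons,
          List.drop_zero, List.reverse_reverse]
        rw [step, pvSplit1_nl]
        simp [pvModifyHead_id]
      · have hpre : List.isPrefixOf ['\n'] (c :: rest) = false := by
          simp [List.isPrefixOf]
          exact fun h' => hc h'.symm
        simp only [hpre, Bool.false_eq_true, if_false]
        have step := ih rest (cur ++ [c]) acc (by simp at h ⊢; omega)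
        rw [List.reverse_append] at step
        simp only [List.reverse_singleton, List.singleton_append] at step
        rw [step, pvSplit1_cons_ne c rest (by simp [hc]), pvModifyHead_comp]
lemma pvSplitOn_eq (cs : List Char) : PySem.Chars.splitOn cs ['\n'] = pvSplit1 cs := by
  unfold PySem.Chars.splitOn
  have := pvGo_spec (cs.length + 1) cs [] [] (by omega)
  simp only [List.reverse_nil] at this
  rw [this, pvModifyHead_nil_append]
  simp

lemma pvCountHash_eq (l : List Char) : pvCountHash l = (l.takeWhile (· == '#')).length := by
  induction l with
  | nil => rfl
  | cons c rest ih =>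
    by_cases h : c = '#' <;> simp [pvCountHash, h, ih]

-- M is either empty or starts with the newline the line scan stopped at
def pvTailShape (M : List Char) : Prop := M = [] ∨ ∃ tl, M = '\n' :: tl

lemma pvDropApp (p : Char → Bool) (hp : p '\n' = false) (R M : List Char)
    (hM : pvTailShape M) :
    (R ++ M).dropWhile p = R.dropWhile p ++ M := by
  have hM' : M.dropWhile p = M := by
    rcases hM with rfl | ⟨tl, rfl⟩ <;> simp [List.dropWhile_cons, hp]
  rw [List.dropWhile_append]
  split_ifs with h
  · rw [List.isEmpty_iff] at h
    rw [hM', h, List.nil_append]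
  · rfl

lemma pvTakeApp' (p : Char → Bool) (hp : p '\n' = false) (R M : List Char)
    (hM : pvTailShape M) :
    (R ++ M).takeWhile p = R.takeWhile p := by
  have hM' : M.takeWhile p = [] := by
    rcases hM with rfl | ⟨tl, rfl⟩ <;> simp [List.takeWhile_cons, hp]
  rw [List.takeWhile_append]
  split_ifs with h
  · rw [hM', List.append_nil]
    exact ((List.takeWhile_prefix p).eq_of_length h).symm
  · rfl

lemma pvTakeApp (p : Char → Bool) (hp : p '\n' = false) (R M : List Char)
    (hR : ∀ c ∈ R, p c = true) (hM : pvTailShape M) :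
    (R ++ M).takeWhile p = R := by
  rw [pvTakeApp' p hp R M hM]
  exact List.takeWhile_eq_self_iff.mpr hR

lemma pvTakeWhile_lineWS (L : List Char) (h : ∀ c ∈ L, (c != '\n') = true) :
    L.takeWhile pvLineWS = L.takeWhile PySem.Chars.isspace := by
  induction L with
  | nil => rfl
  | cons c t ih =>
    have hc := h c (by simp)
    have ht : ∀ x ∈ t, (x != '\n') = true := fun x hx => h x (by simp [hx])
    by_cases hs : PySem.Chars.isspace c <;>
      simp [List.takeWhile_cons, pvLineWS, hc, hs, ih ht]

lemma pvDropWhile_lineWS (L : List Char) (h : ∀ c ∈ L, (c != '\n') = true) :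
    L.dropWhile pvLineWS = L.dropWhile PySem.Chars.isspace := by
  induction L with
  | nil => rfl
  | cons c t ih =>
    have hc := h c (by simp)
    have ht : ∀ x ∈ t, (x != '\n') = true := fun x hx => h x (by simp [hx])
    by_cases hs : PySem.Chars.isspace c <;>
      simp [List.dropWhile_cons, pvLineWS, hc, hs, ih ht]

lemma pvRstrip_cons (c : Char) (t : List Char) (hc : PySem.Chars.isspace c = false) :
    ∃ u, PySem.Chars.rstrip (c :: t) = c :: u := by
  unfold PySem.Chars.rstrip
  rw [List.reverse_cons, List.dropWhile_append]
  split_ifs with h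
  · exact ⟨[], by simp [List.dropWhile_cons, hc]⟩
  · exact ⟨(List.dropWhile PySem.Chars.isspace t.reverse).reverse, by simp⟩

lemma pvHeaderTest (L : List Char) :
    PySem.Chars.startswith (PySem.Chars.strip L) ['#']
      = ((L.dropWhile PySem.Chars.isspace).head? == some '#') := by
  have hnw := List.head?_dropWhile_not PySem.Chars.isspace L
  unfold PySem.Chars.strip PySem.Chars.lstrip
  cases hm : L.dropWhile PySem.Chars.isspace with
  | nil => simp [PySem.Chars.rstrip, PySem.Chars.startswith]
  | cons c t =>
    rw [hm] at hnw
    simp only [List.head?_cons] at hnw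
    obtain ⟨u, hu⟩ := pvRstrip_cons c t hnw
    rw [hu]
    by_cases hc9 : c = '#'
    · subst hc9
      simp [PySem.Chars.startswith, List.isPrefixOf]
    · have h1 : PySem.Chars.startswith (c :: u) ['#'] = false := by
        simp [PySem.Chars.startswith, List.isPrefixOf]
        exact fun h' => hc9 h'.symm
      have h2 : ((some c : Option Char) == some '#') = false := by
        simp [hc9]
      simp only [List.head?_cons]
      rw [h1, h2]

lemma pvDropLenTakeWhile (p : Char → Bool) (l : List Char) :
    l.drop (l.takeWhile p).length = l.dropWhile p := by
  rw [show l.drop (l.takeWhile p).length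
        = ((l.takeWhile p ++ l.dropWhile p).drop (l.takeWhile p).length) by
      rw [List.takeWhile_append_dropWhile]]
  exact List.drop_left

lemma pvA_line_header (L : List Char)
    (hh : (L.dropWhile PySem.Chars.isspace).head? = some '#') :
    pvA_line L = List.replicate (min (((L.dropWhile PySem.Chars.isspace).takeWhile (· == '#')).length + 2) 6) '#'
      ++ ' ' :: ((L.dropWhile PySem.Chars.isspace).dropWhile (· == '#')).dropWhile PySem.Chars.isspace := by
  have hsw : PySem.Chars.startswith (PySem.Chars.strip L) ['#'] = true := by
    rw [pvHeaderTest, hh]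
    simp
  simp only [pvA_line, hsw, if_true, PySem.Chars.lstrip, pvCountHash_eq]
  rw [PySem.List.slice_from _ (Int.natCast_nonneg _), Int.toNat_natCast, pvDropLenTakeWhile]

lemma pvA_line_nonheader (L : List Char)
    (hh : ¬ (L.dropWhile PySem.Chars.isspace).head? = some '#') :
    pvA_line L = L := by
  unfold pvA_line
  rw [if_neg]
  rw [pvHeaderTest]
  simp [hh]

lemma pvSplit1_no_nl (L : List Char) (hL : ∀ c ∈ L, (c != '\n') = true) :
    pvSplit1 L = [L] := by
  rw [pvSplit1]
  rw [List.takeWhile_eq_self_iff.mpr hL]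
  split
  · next heq => rw [List.dropWhile_eq_nil_iff.mpr hL] at heq; exact absurd heq (by simp)
  · rfl

lemma pvSplit1_app_nl (L tl : List Char) (hL : ∀ c ∈ L, (c != '\n') = true) :
    pvSplit1 (L ++ '\n' :: tl) = L :: pvSplit1 tl := by
  have hM : pvTailShape ('\n' :: tl) := Or.inr ⟨tl, rfl⟩
  have h1 : (L ++ '\n' :: tl).takeWhile (· != '\n') = L :=
    pvTakeApp _ (by simp) L _ hL hM
  have h2 : (L ++ '\n' :: tl).dropWhile (· != '\n') = '\n' :: tl := by
    rw [pvDropApp _ (by simp) L _ hM, List.dropWhile_eq_nil_iff.mpr hL, List.nil_append]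
  rw [pvSplit1, h1]
  split
  · next x tl' heq =>
    rw [h2] at heq
    obtain ⟨rfl, rfl⟩ : '\n' = x ∧ tl = tl' := by
      constructor <;> [exact (List.cons.injEq .. ▸ heq).1; exact (List.cons.injEq .. ▸ heq).2]
    rfl
  · next heq => rw [h2] at heq; exact absurd heq (by simp)

-- abbreviations for the subset chains used below
lemma pvSubChain {p : Char → Bool} {L : List Char} (hL : ∀ c ∈ L, (c != '\n') = true) :
    ∀ c ∈ L.dropWhile p, (c != '\n') = true :=
  fun c hc => hL c ((List.dropWhile_suffix p).sublist.subset hc)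

-- the condition B tests equals "first line's lstrip starts with '#'"
lemma pvCond (L M : List Char) (hL : ∀ c ∈ L, (c != '\n') = true) (hM : pvTailShape M) :
    (((L ++ M).dropWhile pvLineWS).head? == some '#')
      = ((L.dropWhile PySem.Chars.isspace).head? == some '#') := by
  have hcs1 : (L ++ M).dropWhile pvLineWS = L.dropWhile PySem.Chars.isspace ++ M := by
    rw [pvDropApp pvLineWS (by simp [pvLineWS]) L M hM, pvDropWhile_lineWS L hL]
  rw [hcs1]
  cases L.dropWhile PySem.Chars.isspace with
  | nil => rcases hM with rfl | ⟨tl, rfl⟩ <;> simp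
  | cons a t => simp

-- head ++ rest of one B round = A's treatment of the first line
lemma pvHeadRest (L M : List Char) (hL : ∀ c ∈ L, (c != '\n') = true) (hM : pvTailShape M) :
    (if ((L ++ M).dropWhile pvLineWS).head? == some '#'
      then List.replicate (min ((((L ++ M).dropWhile pvLineWS).takeWhile (· == '#')).length + 2) 6) '#' ++ [' ']
      else (L ++ M).takeWhile pvLineWS)
    ++ (pvB_tail (L ++ M)).takeWhile (· != '\n')
    = pvA_line L := by
  unfold pvB_tail
  have hcs1 : (L ++ M).dropWhile pvLineWS = L.dropWhile PySem.Chars.isspace ++ M := by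
    rw [pvDropApp pvLineWS (by simp [pvLineWS]) L M hM, pvDropWhile_lineWS L hL]
  have hm_nl : ∀ c ∈ L.dropWhile PySem.Chars.isspace, (c != '\n') = true := pvSubChain hL
  by_cases hh : (L.dropWhile PySem.Chars.isspace).head? = some '#'
  · have hcond := pvCond L M hL hM
    rw [hh] at hcond
    simp only [BEq.rfl] at hcond
    rw [if_pos hcond, if_pos hcond, hcs1]
    have e1 : (L.dropWhile PySem.Chars.isspace ++ M).takeWhile (· == '#')
        = (L.dropWhile PySem.Chars.isspace).takeWhile (· == '#') :=
      pvTakeApp' _ (by decide) _ M hM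
    have e2 : (L.dropWhile PySem.Chars.isspace ++ M).dropWhile (· == '#')
        = (L.dropWhile PySem.Chars.isspace).dropWhile (· == '#') ++ M :=
      pvDropApp _ (by decide) _ M hM
    have hR_nl : ∀ c ∈ (L.dropWhile PySem.Chars.isspace).dropWhile (· == '#'), (c != '\n') = true :=
      pvSubChain hm_nl
    have e3 : ((L.dropWhile PySem.Chars.isspace).dropWhile (· == '#') ++ M).dropWhile pvLineWS
        = ((L.dropWhile PySem.Chars.isspace).dropWhile (· == '#')).dropWhile PySem.Chars.isspace ++ M := by
      rw [pvDropApp pvLineWS (by simp [pvLineWS]) _ M hM, pvDropWhile_lineWS _ hR_nl]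
    have hR'_nl : ∀ c ∈ ((L.dropWhile PySem.Chars.isspace).dropWhile (· == '#')).dropWhile PySem.Chars.isspace,
        (c != '\n') = true := pvSubChain hR_nl
    have e4 : (((L.dropWhile PySem.Chars.isspace).dropWhile (· == '#')).dropWhile PySem.Chars.isspace ++ M).takeWhile (· != '\n')
        = ((L.dropWhile PySem.Chars.isspace).dropWhile (· == '#')).dropWhile PySem.Chars.isspace :=
      pvTakeApp _ (by simp) _ M hR'_nl hM
    rw [e1, e2, e3, e4, pvA_line_header L hh]
    simp
  · have hcond := pvCond L M hL hM
    have hcond' : (((L ++ M).dropWhile pvLineWS).head? == some '#') = false := by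
      rw [hcond]
      cases hx : (L.dropWhile PySem.Chars.isspace).head? with
      | none => rfl
      | some a =>
        have : ¬ a = '#' := fun hEq => hh (by rw [hx, hEq])
        simp [this]
    rw [if_neg (by simp [hcond']), if_neg (by simp [hcond']), hcs1]
    have e5 : (L ++ M).takeWhile pvLineWS = L.takeWhile PySem.Chars.isspace := by
      rw [pvTakeApp' pvLineWS (by simp [pvLineWS]) L M hM, pvTakeWhile_lineWS L hL]
    have e6 : (L.dropWhile PySem.Chars.isspace ++ M).takeWhile (· != '\n')
        = L.dropWhile PySem.Chars.isspace :=
      pvTakeApp _ (by simp) _ M hm_nl hM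
    rw [e5, e6, pvA_line_nonheader L hh, List.takeWhile_append_dropWhile]

-- the tail B hands to the next round is exactly M
lemma pvScrut (L M : List Char) (hL : ∀ c ∈ L, (c != '\n') = true) (hM : pvTailShape M) :
    (pvB_tail (L ++ M)).dropWhile (· != '\n') = M := by
  unfold pvB_tail
  have hcs1 : (L ++ M).dropWhile pvLineWS = L.dropWhile PySem.Chars.isspace ++ M := by
    rw [pvDropApp pvLineWS (by simp [pvLineWS]) L M hM, pvDropWhile_lineWS L hL]
  have hm_nl : ∀ c ∈ L.dropWhile PySem.Chars.isspace, (c != '\n') = true := pvSubChain hL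
  have hdropM : ∀ (R : List Char), (∀ c ∈ R, (c != '\n') = true) →
      (R ++ M).dropWhile (· != '\n') = M := by
    intro R hR
    rw [pvDropApp _ (by simp) R M hM, List.dropWhile_eq_nil_iff.mpr hR, List.nil_append]
  split_ifs with hh
  · rw [hcs1]
    have e2 : (L.dropWhile PySem.Chars.isspace ++ M).dropWhile (· == '#')
        = (L.dropWhile PySem.Chars.isspace).dropWhile (· == '#') ++ M :=
      pvDropApp _ (by decide) _ M hM
    have hR_nl : ∀ c ∈ (L.dropWhile PySem.Chars.isspace).dropWhile (· == '#'), (c != '\n') = true :=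
      pvSubChain hm_nl
    have e3 : ((L.dropWhile PySem.Chars.isspace).dropWhile (· == '#') ++ M).dropWhile pvLineWS
        = ((L.dropWhile PySem.Chars.isspace).dropWhile (· == '#')).dropWhile PySem.Chars.isspace ++ M := by
      rw [pvDropApp pvLineWS (by simp [pvLineWS]) _ M hM, pvDropWhile_lineWS _ hR_nl]
    rw [e2, e3]
    exact hdropM _ (pvSubChain hR_nl)
  · rw [hcs1]
    exact hdropM _ hm_nl

-- one outer-loop round of B equals one line of A plus the recursive rest
lemma pvStep (L M : List Char) (hL : ∀ c ∈ L, (c != '\n') = true) (hM : pvTailShape M)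
    (hrec : ∀ tl, M = '\n' :: tl →
      pvB_go tl = PySem.Chars.join ['\n'] ((pvSplit1 tl).map pvA_line)) :
    pvB_go (L ++ M) = PySem.Chars.join ['\n'] ((pvSplit1 (L ++ M)).map pvA_line) := by
  by_cases hLM : L ++ M = []
  · have hL0 : L = [] := by
      cases L with | nil => rfl | cons a t => simp at hLM
    have hM0 : M = [] := by
      subst hL0; simpa using hLM
    subst hL0; subst hM0
    simp only [List.append_nil]
    rw [pvB_go, if_pos rfl, pvSplit1_nil]
    simp only [List.map_cons, List.map_nil, PySem.Chars.join_singleton]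
    rw [pvA_line_nonheader [] (by simp)]
  · rw [pvB_go, if_neg hLM]
    have hscr := pvScrut L M hL hM
    rw [pvHeadRest L M hL hM]
    split
    · next x tl heq =>
      have hMx : M = x :: tl := hscr.symm.trans heq
      rcases hM with rfl | ⟨tl0, rfl⟩
      · simp at hMx
      · obtain ⟨rfl, rfl⟩ : '\n' = x ∧ tl0 = tl := by
          constructor <;> [exact (List.cons.injEq .. ▸ hMx).1; exact (List.cons.injEq .. ▸ hMx).2]
        rw [hrec tl0 rfl]
        rw [pvSplit1_app_nl L tl0 hL]
        obtain ⟨T, Ts, hTs⟩ := pvSplit1_ne_nil tl0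
        rw [hTs]
        simp only [List.map_cons, PySem.Chars.join_cons_cons]
        simp
    · next heq =>
      have hM0 : M = [] := hscr.symm.trans heq
      subst hM0
      simp only [List.append_nil]
      rw [pvSplit1_no_nl L hL]
      simp only [List.map_cons, List.map_nil, PySem.Chars.join_singleton]

lemma pvMain (n : Nat) : ∀ cs : List Char, cs.length ≤ n →
    pvB_go cs = PySem.Chars.join ['\n'] ((pvSplit1 cs).map pvA_line) := by
  induction n with
  | zero =>
    intro cs h
    have hnil : cs = [] := by cases cs with | nil => rfl | cons a t => simp at h
    subst hnil
    exact pvStep [] [] (by simp) (Or.inl rfl) (by intro tl h; cases h)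
  | succ f ih =>
    intro cs hlen
    have hsplit : cs.takeWhile (· != '\n') ++ cs.dropWhile (· != '\n') = cs :=
      List.takeWhile_append_dropWhile
    have hL : ∀ c ∈ cs.takeWhile (· != '\n'), (c != '\n') = true :=
      fun c hc => List.mem_takeWhile_imp (p := fun x => x != '\n') hc
    have hM : pvTailShape (cs.dropWhile (· != '\n')) := by
      have hnw := List.head?_dropWhile_not (· != '\n') cs
      cases hMc : cs.dropWhile (· != '\n') with
      | nil => exact Or.inl rfl
      | cons x tl =>
        rw [hMc] at hnw
        simp only [List.head?_cons] at hnw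
        simp only [bne_eq_false_iff_eq] at hnw
        exact Or.inr ⟨tl, by rw [hnw]⟩
    rw [← hsplit]
    apply pvStep _ _ hL hM
    intro tl htl
    apply ih
    have hlen2 := congrArg List.length hsplit
    rw [List.length_append, htl] at hlen2
    simp at hlen2
    omega

-- ===== VERDICT (by name: the statement is the Claim_ definition above) =====
theorem adjust_header_levels_py_spec : Claim_equal_adjust_header_levels_py := by
  intro content _
  unfold Spec_adjust_header_levels_py adjust_header_levels_py adjust_header_levels_py_alt
  rw [pvMain content.toList.length content.toList le_rfl]
  rw [pvSplitOn_eq]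
  simp only [PySem.List.foldl_append_singleton_eq_map, List.nil_append]
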